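-- pv_equiv track=rewrite | github.com/jordanIAxelrod/MaterialsGenomeInitiative | src/indexation.py | word2idx
-- ===== SOURCE A (Python) =====
-- from collections import Counter
-- from typing import List
--
-- def word2idx(sentences: List[List[str]]) -> (List[List[int]], int):
--     """
--     Transform words/categories to indices.
--
--     args:
--       - sentences: a list of sentences (tokenized)
--
--     returns:
--       - indices: a list of sentences (word indices)
--       - vocab_size: an integer
--     """
--
--     word_pool = [w for s in sentences for w in s]
--
--     word_counts = sorted(
--         Counter(word_pool).items(), key=lambda x: x[1], reverse=True
--         )
--     word_types = [x[0] for x in word_counts]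
--     word_type2idx = {wordtype: i for i, wordtype in enumerate(word_types)}
--
--     indices = [[word_type2idx[w] for w in s] for s in sentences]
--
--     return (indices, len(word_type2idx))
-- ===== SOURCE B (Python) =====
-- from collections import Counter
-- from typing import List
--
--
-- def word2idx(sentences: List[List[str]]) -> (List[List[int]], int):
--     # Counting-sort variant: bucket word types by frequency instead of sorting.
--     word_pool = [w for s in sentences for w in s]
--     counts = Counter(word_pool)
--
--     buckets = {}
--     for w, c in counts.items():
--         buckets.setdefault(c, []).append(w)
--
--     max_count = max(counts.values(), default=0)
--     ranked = []
--     for c in range(max_count, 0, -1):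
--         ranked += buckets.get(c, [])
--
--     word_type2idx = {w: i for i, w in enumerate(ranked)}
--     indices = [[word_type2idx[w] for w in s] for s in sentences]
--     return (indices, len(word_type2idx))
-- ===== Notes on version B (the rewrite author's own statement) =====
-- stated objective: alternative
-- what changed: Replaces the stable sort of Counter items by count with a counting sort: word types are bucketed by frequency in Counter insertion order and the ranked vocabulary is the concatenation of buckets from the maximum count down to 1.
import Mathlib
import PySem

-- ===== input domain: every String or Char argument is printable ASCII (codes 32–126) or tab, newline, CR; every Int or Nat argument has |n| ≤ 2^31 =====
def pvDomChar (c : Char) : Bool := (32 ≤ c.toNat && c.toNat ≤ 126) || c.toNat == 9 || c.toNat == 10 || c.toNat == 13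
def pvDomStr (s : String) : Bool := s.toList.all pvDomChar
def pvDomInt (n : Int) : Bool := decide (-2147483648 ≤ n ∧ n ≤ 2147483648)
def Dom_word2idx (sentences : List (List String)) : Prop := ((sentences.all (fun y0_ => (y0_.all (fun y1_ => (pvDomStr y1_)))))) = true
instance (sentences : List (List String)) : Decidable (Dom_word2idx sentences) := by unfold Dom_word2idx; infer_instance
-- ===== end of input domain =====

-- B replaces A's stable sort by count with a counting sort over frequency buckets; same results, similar cost.

-- ===== PORT A =====
def word2idx (sentences : List (List String)) : List (List Int) × Int :=
  let word_pool := sentences.flatMap (fun s => s)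
  let word_counts := PySem.List.sorted (PySem.Dict.counter word_pool).items (fun x => x.2) true
  let word_types := word_counts.map (fun x => x.1)
  let word_type2idx := (PySem.List.enumerate word_types).foldl
      (fun d p => d.insert p.2 p.1) PySem.Dict.empty
  -- word_type2idx[w]: every w of sentences is a key of word_type2idx, so getD is exact here
  let indices := sentences.map (fun s => s.map (fun w => word_type2idx.getD w 0))
  (indices, (word_type2idx.size : Int))

-- ===== PORT B =====
def word2idx_alt (sentences : List (List String)) : List (List Int) × Int :=
  let word_pool := sentences.flatMap (fun s => s)
  let counts := PySem.Dict.counter word_pool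
  -- buckets.setdefault(c, []).append(w)
  let buckets := counts.items.foldl (fun b p => b.modify p.2 [] (· ++ [p.1])) PySem.Dict.empty
  let maxCount := PySem.List.maxD counts.values (fun v => v) 0
  let ranked := (PySem.List.pyRange maxCount 0 (-1)).foldl (fun acc c => acc ++ buckets.getD c []) []
  let word_type2idx := (PySem.List.enumerate ranked).foldl
      (fun d p => d.insert p.2 p.1) PySem.Dict.empty
  -- word_type2idx[w]: every w of sentences is a key of word_type2idx, so getD is exact here
  let indices := sentences.map (fun s => s.map (fun w => word_type2idx.getD w 0))
  (indices, (word_type2idx.size : Int))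

-- ===== PRECONDITION & SPEC =====
def Spec_word2idx (sentences : List (List String)) (out : List (List Int) × Int) : Prop := out = word2idx_alt sentences
instance (sentences : List (List String)) (out : List (List Int) × Int) : Decidable (Spec_word2idx sentences out) := by unfold Spec_word2idx; infer_instance

-- ===== CLAIM (what is proved, stated in full; the proofs are below) =====
def Claim_equal_word2idx : Prop := ∀ (sentences : List (List String)), Dom_word2idx sentences → Spec_word2idx sentences (word2idx sentences)

-- ===== LEMMAS AND PROOFS =====

-- inserting x in front when the head (if any) compares strictly below x
theorem pv_insertBy_cons {α : Type} (before : α → α → Bool) (x : α) (ys : List α)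
    (h : ∀ y ∈ ys, before x y = true) :
    PySem.List.insertBy before x ys = x :: ys := by
  cases ys with
  | nil => rfl
  | cons y t => simp [PySem.List.insertBy, h y (by simp)]

-- skipping a whole prefix none of whose elements compares below x
theorem pv_insertBy_append {α : Type} (before : α → α → Bool) (x : α) (ys zs : List α)
    (h : ∀ y ∈ ys, before x y = false) :
    PySem.List.insertBy before x (ys ++ zs) = ys ++ PySem.List.insertBy before x zs := by
  induction ys with
  | nil => rfl
  | cons y t ih =>
      simp only [List.cons_append, PySem.List.insertBy, h y (by simp)]
      simp only [Bool.false_eq_true, if_false, List.cons.injEq, true_and]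
      exact ih (fun y hy => h y (by simp [hy]))

-- inserting (stably, descending) into a bucket concatenation appends to x's own bucket
theorem pv_insertBy_flatMap {α : Type} (D : List Int) (F : Int → List (α × Int)) (x : α × Int)
    (hD : D.Pairwise (· > ·)) (hF : ∀ c ∈ D, ∀ p ∈ F c, p.2 = c) (hx : x.2 ∈ D) :
    PySem.List.insertBy (fun a b => decide (b.2 < a.2)) x (D.flatMap F)
      = D.flatMap (fun c => if c = x.2 then F c ++ [x] else F c) := by
  induction D with
  | nil => simp at hx
  | cons c D' ih =>
      rcases List.pairwise_cons.mp hD with ⟨hcD, hD'⟩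
      by_cases hc : c = x.2
      · subst hc
        -- skip through F x.2 (keys = x.2, not < x.2), then x goes in front of the rest
        simp only [List.flatMap_cons]
        rw [pv_insertBy_append _ _ _ _ (by
            intro y hy
            have := hF x.2 (by simp) y hy
            simp [this])]
        rw [pv_insertBy_cons _ _ _ (by
            intro y hy
            rcases List.mem_flatMap.mp hy with ⟨d, hd, hyd⟩
            have h1 : y.2 = d := hF d (by simp [hd]) y hyd
            have h2 : d < x.2 := hcD d hd
            simp [h1, h2])]
        rw [if_pos trivial]
        have hrest : D'.flatMap (fun d => if d = x.2 then F d ++ [x] else F d) = D'.flatMap F := by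
          apply List.flatMap_congr  -- pointwise on members
          intro d hd
          have : d ≠ x.2 := by have := hcD d hd; omega
          simp [this]
        rw [hrest, List.append_assoc, List.singleton_append]
      · -- c > x.2 since x.2 ∈ D'; skip bucket c entirely
        have hx' : x.2 ∈ D' := by
          rcases List.mem_cons.mp hx with h | h
          · exact absurd h.symm hc
          · exact h
        simp only [List.flatMap_cons]
        rw [pv_insertBy_append _ _ _ _ (by
            intro y hy
            have h1 : y.2 = c := hF c (by simp) y hy
            have h2 : x.2 < c := hcD _ hx'
            simp [h1]; omega)]
        rw [ih hD' (fun d hd => hF d (by simp [hd])) hx']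
        simp [hc]

-- the stable reverse sort by key ·.2 IS the bucket concatenation over any descending cover D
theorem pv_sorted_rev_eq_flatMap {α : Type} (l : List (α × Int)) (D : List Int)
    (hD : D.Pairwise (· > ·)) (hmem : ∀ p ∈ l, p.2 ∈ D) :
    PySem.List.sorted l (fun p => p.2) true
      = D.flatMap (fun c => l.filter (fun p => p.2 == c)) := by
  induction l using List.reverseRecOn with
  | nil => simp [PySem.List.sorted]
  | append_singleton l x ih =>
      rw [PySem.List.sorted_rev_eq_foldl_insertBy, List.foldl_append]
      simp only [List.foldl_cons, List.foldl_nil]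
      rw [← PySem.List.sorted_rev_eq_foldl_insertBy]
      rw [ih (fun p hp => hmem p (by simp [hp]))]
      rw [pv_insertBy_flatMap D _ x hD
          (fun c _ p hp => by simpa using (List.mem_filter.mp hp).2)
          (hmem x (by simp))]
      apply List.flatMap_congr
      intro c _
      rw [List.filter_append]
      by_cases h : c = x.2
      · subst h
        simp
      · have : (x.2 == c) = false := by simpa using (fun e => h e.symm)
        simp [h, this]

-- the vocabulary B assembles from buckets is exactly A's sorted vocabulary
theorem pv_ranked_eq (pool : List String) :
    (PySem.List.pyRange (PySem.List.maxD (PySem.Dict.counter pool).values (fun v => v) 0) 0 (-1)).foldl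
        (fun acc c => acc ++ ((PySem.Dict.counter pool).items.foldl
            (fun b p => b.modify p.2 [] (· ++ [p.1])) PySem.Dict.empty).getD c []) []
      = (PySem.List.sorted (PySem.Dict.counter pool).items (fun x => x.2) true).map (fun x => x.1) := by
  have hD : (PySem.List.pyRange (PySem.List.maxD (PySem.Dict.counter pool).values (fun v => v) 0) 0 (-1)).Pairwise (· > ·) := by
    rw [PySem.List.pyRange_neg_one]
    exact List.pairwise_map.mpr (List.pairwise_lt_range.imp (by intro a b h; omega))
  have hmem : ∀ p ∈ (PySem.Dict.counter pool).items,
      p.2 ∈ PySem.List.pyRange (PySem.List.maxD (PySem.Dict.counter pool).values (fun v => v) 0) 0 (-1) := by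
    intro p hp
    rw [PySem.List.mem_pyRange_neg_one]
    constructor
    · -- 0 < p.2 : the count of a word that occurs in pool
      have h := hp
      rw [PySem.Dict.items_counter] at h
      rcases List.mem_map.mp h with ⟨k, hk, hkp⟩
      have : k ∈ pool := (PySem.Set.mem_ofList pool k).mp hk
      have : 0 < pool.count k := List.count_pos_iff.mpr this
      rw [← hkp]
      simpa using this
    · -- p.2 ≤ max of the counter's values
      have hv : p.2 ∈ (PySem.Dict.counter pool).values :=
        List.mem_map.mpr ⟨p, hp, rfl⟩
      exact PySem.List.le_maxD_id _ 0 _ hv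
  have hb : ∀ c, ((PySem.Dict.counter pool).items.foldl
      (fun b p => b.modify p.2 [] (· ++ [p.1])) PySem.Dict.empty).getD c []
      = ((PySem.Dict.counter pool).items.filter (fun p => p.2 == c)).map (fun p => p.1) := by
    intro c
    have h1 : (PySem.Dict.counter pool).items.foldl
        (fun b p => b.modify p.2 [] (· ++ [p.1])) PySem.Dict.empty
        = ((PySem.Dict.counter pool).items.map (fun p => (p.2, p.1))).foldl
            (fun b q => b.modify q.1 [] (· ++ [q.2])) PySem.Dict.empty := by
      rw [List.foldl_map]
    rw [h1, PySem.Dict.getD_foldl_modify_append, PySem.Dict.getD_empty, List.filter_map,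
        List.map_map, List.nil_append]
    rfl
  rw [PySem.List.foldl_append_eq_flatMap, List.nil_append,
      pv_sorted_rev_eq_flatMap _ _ hD hmem, List.map_flatMap]
  exact List.flatMap_congr (fun c _ => hb c)

theorem word2idx_spec : Claim_equal_word2idx := by
  intro sentences _
  unfold Spec_word2idx word2idx word2idx_alt
  simp only [pv_ranked_eq]
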